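-- pv_equiv track=rewrite | github.com/pypi-data/pypi-mirror-399 | packages/relayx-py/relayx_py-1.1.0-py3-none-any.whl/relayx_py/realtime.py | topic_pattern_matcher
-- ===== SOURCE A (Python) =====
-- def topic_pattern_matcher(pattern_a, pattern_b):
--     """
--     Return True when two NATS-style subject patterns could match
--     the same concrete subject.
--
--     Rules
--     -----
--     · Literal tokens must be equal.
--     · '*'  ⇒ exactly one token (either side).
--     · '>'  ⇒ one‑or‑more tokens AND must be the final token in its pattern.
--     · '$'  never allowed (assume caller already validated with is_valid_subject).
--
--     The algorithm walks both token lists with pointers and back‑tracks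
--     when it finds a '>' that can absorb additional tokens.
--     """
--     a = pattern_a.split(".")
--     b = pattern_b.split(".")
--     i = j = 0                       # cursors
--     star_a_j = star_b_j = -1        # next positions to try when back‑tracking
--
--     while i < len(a) or j < len(b):
--         tok_a = a[i] if i < len(a) else None
--         tok_b = b[j] if j < len(b) else None
--
--         # Handle '>' in pattern‑A (check before wildcard matching)
--         if tok_a == ">":
--             if i != len(a) - 1 or j >= len(b):      # must be final & eat ≥1 token
--                 return False
--             i += 1               # step past '>'
--             j += 1               # consume first token in B
--             star_a_j = j         # remember where to start back‑tracking
--             continue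
--
--         # Handle '>' in pattern‑B (check before wildcard matching)
--         if tok_b == ">":
--             if j != len(b) - 1 or i >= len(a):
--                 return False
--             j += 1
--             i += 1
--             star_b_j = i
--             continue
--
--         # Literal match or single‑token wildcard on either side
--         single = (tok_a == "*" and j < len(b)) or (tok_b == "*" and i < len(a))
--         if (tok_a is not None and tok_a == tok_b) or single:
--             i += 1
--             j += 1
--             continue
--
--         # Back‑track using the most recent '>' in A
--         if star_a_j != -1 and star_a_j <= len(b):
--             j = star_a_j
--             star_a_j += 1        # make A's '>' absorb one more B‑token
--             continue
--
--         # Back‑track using the most recent '>' in B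
--         if star_b_j != -1 and star_b_j <= len(a):
--             i = star_b_j
--             star_b_j += 1        # make B's '>' absorb one more A‑token
--             continue
--
--         return False             # dead‑end
--
--     return True
-- ===== SOURCE B (Python) =====
-- def topic_pattern_matcher(pattern_a, pattern_b):
--     """Lockstep re-implementation: one shared cursor, no backtracking pointers."""
--     a = pattern_a.split(".")
--     b = pattern_b.split(".")
--     i = 0
--     n = min(len(a), len(b))
--     while i < n:
--         ta, tb = a[i], b[i]
--         if ta == ">":
--             return i == len(a) - 1
--         if tb == ">":
--             return i == len(b) - 1
--         if ta != tb and ta != "*" and tb != "*":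
--             return False
--         i += 1
--     return len(a) == len(b)
-- ===== Notes on version B (the rewrite author's own statement) =====
-- stated objective: simpler
-- what changed: Replaces A's dual-cursor loop with backtracking pointers (star_a_j/star_b_j) by a single lockstep index over both token lists with immediate early returns at a '>' token, and fixes A's wrong False when both valid patterns end in '>' at different depths.
-- intended difference: On patterns that both end in a final '>' token at different depths with a compatible prefix (e.g. 'x.>' vs '>'), A returns False although both patterns match common subjects such as 'x.y'; B returns True, the intended overlap answer, since '>' absorbs one-or-more trailing tokens. — e.g. on topic_pattern_matcher("x.>", ">"): A returns false, B returns true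
-- outside the precondition, e.g. on topic_pattern_matcher('>', 'x.>.y'): A returns False, B returns True
import Mathlib
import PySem

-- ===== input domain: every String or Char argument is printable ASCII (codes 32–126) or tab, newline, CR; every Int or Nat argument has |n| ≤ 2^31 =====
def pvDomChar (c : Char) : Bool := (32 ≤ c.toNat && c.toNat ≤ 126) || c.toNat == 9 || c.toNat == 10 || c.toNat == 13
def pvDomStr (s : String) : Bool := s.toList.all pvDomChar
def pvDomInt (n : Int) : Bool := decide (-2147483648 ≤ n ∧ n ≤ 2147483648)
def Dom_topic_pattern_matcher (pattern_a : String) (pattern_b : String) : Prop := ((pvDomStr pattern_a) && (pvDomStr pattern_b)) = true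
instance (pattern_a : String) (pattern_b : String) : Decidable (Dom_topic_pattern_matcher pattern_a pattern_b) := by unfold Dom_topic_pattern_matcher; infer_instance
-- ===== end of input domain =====

-- B replaces A's two-cursor/backtracking-pointer walk by a single lockstep index (simpler), and
-- returns the intended True where both valid patterns end in '>' at different depths (see D_ below).

-- ===== PORT A =====
-- tokenisation shared by both ports: pattern.split(".")
-- p.split(".") : separator "." is non-empty, so split? is always some (exact)
def pvTokens (p : String) : List String := (PySem.Str.split? p ".").getD []

-- the while-loop of A, step for step; fuel only makes the recursion structural
def pvLoopA (a b : List String) (fuel : Nat) (i j saj sbj : Int) : Bool :=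
  match fuel with
  | 0 => false
  | fuel + 1 =>
    if i < PySem.List.len a ∨ j < PySem.List.len b then
      let tokA : Option String := if i < PySem.List.len a then PySem.List.pyGet? a i else none
      let tokB : Option String := if j < PySem.List.len b then PySem.List.pyGet? b j else none
      if tokA = some ">" then
        if i ≠ PySem.List.len a - 1 ∨ PySem.List.len b ≤ j then false
        else pvLoopA a b fuel (i + 1) (j + 1) (j + 1) sbj
      else if tokB = some ">" then
        if j ≠ PySem.List.len b - 1 ∨ PySem.List.len a ≤ i then false
        else pvLoopA a b fuel (i + 1) (j + 1) saj (i + 1)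
      else if (tokA ≠ none ∧ tokA = tokB) ∨
              ((tokA = some "*" ∧ j < PySem.List.len b) ∨ (tokB = some "*" ∧ i < PySem.List.len a)) then
        pvLoopA a b fuel (i + 1) (j + 1) saj sbj
      else if saj ≠ -1 ∧ saj ≤ PySem.List.len b then
        pvLoopA a b fuel i saj (saj + 1) sbj
      else if sbj ≠ -1 ∧ sbj ≤ PySem.List.len a then
        pvLoopA a b fuel sbj j saj (sbj + 1)
      else false
    else true

def topic_pattern_matcher (pattern_a : String) (pattern_b : String) : Bool :=
  let a := pvTokens pattern_a
  let b := pvTokens pattern_b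
  pvLoopA a b ((a.length + b.length + 4) * 4) 0 0 (-1) (-1)

-- ===== PORT B =====
-- B's while-loop: one lockstep index i over both token lists
def pvLoopB (a b : List String) (fuel i : Nat) : Bool :=
  match fuel with
  | 0 => decide (a.length = b.length)
  | fuel + 1 =>
    if i < min a.length b.length then
      let ta := a.getD i ""
      let tb := b.getD i ""
      if ta = ">" then decide (i = a.length - 1)
      else if tb = ">" then decide (i = b.length - 1)
      else if ta ≠ tb ∧ ta ≠ "*" ∧ tb ≠ "*" then false
      else pvLoopB a b fuel (i + 1)
    else decide (a.length = b.length)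

def topic_pattern_matcher_alt (pattern_a : String) (pattern_b : String) : Bool :=
  let a := pvTokens pattern_a
  let b := pvTokens pattern_b
  pvLoopB a b (min a.length b.length) 0

-- ===== PRECONDITION & SPEC =====
-- Pre_ excludes patterns with '>' at a non-final token position: invalid NATS subjects the
-- docstring assumes the caller already rejected (is_valid_subject); A's backtracking returns
-- accidental values on them.
def pvNoInnerGt (l : List String) : Prop := (l.dropLast.all fun t => t ≠ ">") = true

def Pre_topic_pattern_matcher (pattern_a : String) (pattern_b : String) : Prop :=
  pvNoInnerGt (pvTokens pattern_a) ∧ pvNoInnerGt (pvTokens pattern_b)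

instance (pattern_a : String) (pattern_b : String) : Decidable (Pre_topic_pattern_matcher pattern_a pattern_b) := by
  unfold Pre_topic_pattern_matcher pvNoInnerGt; infer_instance

def pvWitness_topic_pattern_matcher : String × String := ("x.*", "x.y")

-- On patterns that both end in a final '>' token at different depths with a compatible prefix
-- (e.g. 'x.>' vs '>'), A returns False although both patterns match common subjects such as
-- 'x.y'; B returns True, the intended answer, since '>' absorbs one-or-more trailing tokens.
def pvDlist (a b : List String) : Prop :=
  a.getLast? = some ">" ∧ b.getLast? = some ">" ∧ a.length ≠ b.length ∧
  (((a.zip b).take (min a.length b.length - 1)).all fun p => p.1 == p.2 || p.1 == "*" || p.2 == "*") = true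

def D_topic_pattern_matcher (pattern_a : String) (pattern_b : String) : Prop :=
  pvDlist (pvTokens pattern_a) (pvTokens pattern_b)

instance (pattern_a : String) (pattern_b : String) : Decidable (D_topic_pattern_matcher pattern_a pattern_b) := by
  unfold D_topic_pattern_matcher pvDlist; infer_instance

def Spec_topic_pattern_matcher (pattern_a : String) (pattern_b : String) (out : Bool) : Prop :=
  ¬ D_topic_pattern_matcher pattern_a pattern_b → out = topic_pattern_matcher_alt pattern_a pattern_b
instance (pattern_a : String) (pattern_b : String) (out : Bool) : Decidable (Spec_topic_pattern_matcher pattern_a pattern_b out) := by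
  unfold Spec_topic_pattern_matcher; infer_instance

def pvDiffWitness_topic_pattern_matcher : String × String := ("x.>", ">")
def pvDiffWitnessOut_topic_pattern_matcher : Bool × Bool := (false, true)

-- ===== CLAIM =====
def Claim_unchanged_topic_pattern_matcher : Prop := ∀ (pattern_a : String) (pattern_b : String), Dom_topic_pattern_matcher pattern_a pattern_b → Pre_topic_pattern_matcher pattern_a pattern_b → Spec_topic_pattern_matcher pattern_a pattern_b (topic_pattern_matcher pattern_a pattern_b)
def Claim_changed_topic_pattern_matcher : Prop := Dom_topic_pattern_matcher (pvDiffWitness_topic_pattern_matcher.1) (pvDiffWitness_topic_pattern_matcher.2) ∧ Pre_topic_pattern_matcher (pvDiffWitness_topic_pattern_matcher.1) (pvDiffWitness_topic_pattern_matcher.2) ∧ D_topic_pattern_matcher (pvDiffWitness_topic_pattern_matcher.1) (pvDiffWitness_topic_pattern_matcher.2) ∧ topic_pattern_matcher (pvDiffWitness_topic_pattern_matcher.1) (pvDiffWitness_topic_pattern_matcher.2) = pvDiffWitnessOut_topic_pattern_matcher.1 ∧ topic_pattern_matcher_alt (pvDiffWitness_topic_pattern_matcher.1) (pvDiffWitness_topic_pattern_matcher.2)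 = pvDiffWitnessOut_topic_pattern_matcher.2 ∧ pvDiffWitnessOut_topic_pattern_matcher.1 ≠ pvDiffWitnessOut_topic_pattern_matcher.2
def Claim_exact_topic_pattern_matcher : Prop := ∀ (pattern_a : String) (pattern_b : String), Dom_topic_pattern_matcher pattern_a pattern_b → Pre_topic_pattern_matcher pattern_a pattern_b → D_topic_pattern_matcher pattern_a pattern_b → topic_pattern_matcher pattern_a pattern_b ≠ topic_pattern_matcher_alt pattern_a pattern_b

-- ===== LEMMAS AND PROOFS =====

-- getLast? to indexed form
lemma pvGetLast_getD {l : List String} (h : l.getLast? = some ">") :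
    l ≠ [] ∧ l.getD (l.length - 1) "" = ">" := by
  have hne : l ≠ [] := by intro h0; subst h0; simp at h
  rw [List.getLast?_eq_getElem?] at h
  refine ⟨hne, ?_⟩
  have hlen : l.length - 1 < l.length := by
    cases l with
    | nil => exact absurd rfl hne
    | cons x xs => simp
  rw [List.getD_eq_getElem l "" hlen]
  rw [List.getElem?_eq_getElem hlen] at h
  exact Option.some.injEq _ _ ▸ (by simpa using h)

-- pvNoInnerGt to indexed form
lemma pvNoInner_idx {l : List String} (h : pvNoInnerGt l) :
    ∀ k, k + 1 < l.length → l.getD k "" ≠ ">" := by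
  intro k hk
  unfold pvNoInnerGt at h
  rw [List.all_eq_true] at h
  have hk' : k < l.dropLast.length := by simp; omega
  have hmem : l.dropLast[k] ∈ l.dropLast := List.getElem_mem hk'
  have := h _ hmem
  rw [List.getElem_dropLast] at this
  rw [List.getD_eq_getElem l "" (by omega)]
  simpa using this

-- the compat prefix of pvDlist, indexed form
lemma pvCompat_idx {a b : List String}
    (h : (((a.zip b).take (min a.length b.length - 1)).all
        fun p => p.1 == p.2 || p.1 == "*" || p.2 == "*") = true) :
    ∀ k, k + 1 < a.length → k + 1 < b.length →
      (a.getD k "" = b.getD k "" ∨ a.getD k "" = "*" ∨ b.getD k "" = "*") := by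
  intro k hka hkb
  rw [List.all_eq_true] at h
  have hk : k < ((a.zip b).take (min a.length b.length - 1)).length := by
    simp [List.length_take, List.length_zip]; omega
  have hmem := List.getElem_mem hk
  have := h _ hmem
  have hz : k < (a.zip b).length := by simp [List.length_zip]; omega
  have hget : ((a.zip b).take (min a.length b.length - 1))[k]'hk = (a.zip b)[k]'hz :=
    List.getElem_take
  have hzip : (a.zip b)[k]'hz = (a[k]'(by omega), b[k]'(by omega)) := List.getElem_zip
  rw [hget, hzip] at this
  simp only [Bool.or_eq_true, beq_iff_eq] at this
  rw [List.getD_eq_getElem a "" (by omega), List.getD_eq_getElem b "" (by omega)]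
  tauto

-- Phase 2a (A's '>' consumed, i = len a): no '>' left in b ⇒ the backtracking sweep ends True
lemma pvAbsorbA_true (a b : List String) :
    ∀ (fuel : Nat) (j saj : Nat) (sbj : Int),
      j ≤ b.length → j ≤ saj → saj ≤ j + 1 →
      (∀ k, j ≤ k → k < b.length → b.getD k "" ≠ ">") →
      2 * (b.length - j) + (j + 1 - saj) + 1 ≤ fuel →
      pvLoopA a b fuel (a.length : Int) (j : Int) (saj : Int) sbj = true := by
  intro fuel
  induction fuel with
  | zero => intro j saj sbj _ _ _ _ hf; omega
  | succ f ih =>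
    intro j saj sbj hj hs1 hs2 hb hf
    by_cases hjb : j < b.length
    · have hjb' : (j : Int) < (b.length : Int) := by exact_mod_cast hjb
      have hbj : b.getD j "" ≠ ">" := hb j le_rfl hjb
      rw [List.getD_eq_getElem b "" hjb] at hbj
      have hsaj : (saj : Int) ≤ (b.length : Int) := by exact_mod_cast (by omega : saj ≤ b.length)
      simp only [pvLoopA, PySem.List.len_eq, lt_self_iff_false, if_false, false_or, hjb',
        if_true, PySem.List.pyGet?_natCast, List.getElem?_eq_getElem hjb,
        reduceCtorEq, Option.some.injEq, hbj, ne_eq, not_false_eq_true, and_false,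
        or_self, not_true_eq_false, and_true, true_and]
      rw [if_pos hsaj]
      have hc : ((saj : Int) + 1) = ((saj + 1 : Nat) : Int) := by push_cast; ring
      rw [hc]
      exact ih saj (saj + 1) sbj (by omega) (by omega) (by omega)
        (fun k hk1 hk2 => hb k (by omega) hk2) (by omega)
    · have : ¬ ((a.length : Int) < (a.length : Int) ∨ (j : Int) < (b.length : Int)) := by
        push Not; exact ⟨le_rfl, by exact_mod_cast (by omega : b.length ≤ j)⟩
      simp only [pvLoopA, PySem.List.len_eq, this, if_false]

-- Phase 2a when b ends in '>': the sweep hits b's final '>' with i = len a and returns False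
lemma pvAbsorbA_false (a b : List String) (hbl : b.getD (b.length - 1) "" = ">") :
    ∀ (fuel : Nat) (j saj : Nat) (sbj : Int),
      j + 1 ≤ b.length → j ≤ saj → saj ≤ j + 1 →
      (∀ k, j ≤ k → k + 1 < b.length → b.getD k "" ≠ ">") →
      2 * (b.length - j) + (j + 1 - saj) + 1 ≤ fuel →
      pvLoopA a b fuel (a.length : Int) (j : Int) (saj : Int) sbj = false := by
  intro fuel
  induction fuel with
  | zero => intro j saj sbj _ _ _ _ hf; omega
  | succ f ih =>
    intro j saj sbj hj hs1 hs2 hb hf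
    have hjb : j < b.length := by omega
    have hjb' : (j : Int) < (b.length : Int) := by exact_mod_cast hjb
    by_cases hlast : j = b.length - 1
    · have hbj : b[j] = ">" := by
        rw [← List.getD_eq_getElem b "" hjb, hlast]; exact hbl
      simp only [pvLoopA, PySem.List.len_eq, lt_self_iff_false, if_false, false_or, hjb',
        if_true, PySem.List.pyGet?_natCast, List.getElem?_eq_getElem hjb,
        reduceCtorEq, Option.some.injEq, hbj]
      rw [if_pos (Or.inr le_rfl)]
    · have hbj : b.getD j "" ≠ ">" := hb j le_rfl (by omega)
      rw [List.getD_eq_getElem b "" hjb] at hbj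
      have hsaj : (saj : Int) ≤ (b.length : Int) := by exact_mod_cast (by omega : saj ≤ b.length)
      simp only [pvLoopA, PySem.List.len_eq, lt_self_iff_false, if_false, false_or, hjb',
        if_true, PySem.List.pyGet?_natCast, List.getElem?_eq_getElem hjb,
        reduceCtorEq, Option.some.injEq, hbj, ne_eq, not_false_eq_true, and_false,
        or_self, not_true_eq_false, and_true, true_and]
      rw [if_pos hsaj]
      have hc : ((saj : Int) + 1) = ((saj + 1 : Nat) : Int) := by push_cast; ring
      rw [hc]
      exact ih saj (saj + 1) sbj (by omega) (by omega) (by omega)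
        (fun k hk1 hk2 => hb k (by omega) hk2) (by omega)

-- Phase 2b (B's '>' consumed, j = len b): no '>' left in a ⇒ the sweep ends True
lemma pvAbsorbB_true (a b : List String) :
    ∀ (fuel : Nat) (i sbj : Nat),
      i ≤ a.length → i ≤ sbj → sbj ≤ i + 1 →
      (∀ k, i ≤ k → k < a.length → a.getD k "" ≠ ">") →
      2 * (a.length - i) + (i + 1 - sbj) + 1 ≤ fuel →
      pvLoopA a b fuel (i : Int) (b.length : Int) (-1) (sbj : Int) = true := by
  intro fuel
  induction fuel with
  | zero => intro i sbj _ _ _ _ hf; omega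
  | succ f ih =>
    intro i sbj hi hs1 hs2 ha hf
    by_cases hia : i < a.length
    · have hia' : (i : Int) < (a.length : Int) := by exact_mod_cast hia
      have hai : a.getD i "" ≠ ">" := ha i le_rfl hia
      rw [List.getD_eq_getElem a "" hia] at hai
      have hsbj : (sbj : Int) ≤ (a.length : Int) := by exact_mod_cast (by omega : sbj ≤ a.length)
      simp only [pvLoopA, PySem.List.len_eq, lt_self_iff_false, if_false, or_false, hia',
        if_true, PySem.List.pyGet?_natCast, List.getElem?_eq_getElem hia,
        reduceCtorEq, Option.some.injEq, hai, ne_eq, not_false_eq_true, and_false, false_and,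
        or_self, not_true_eq_false, and_true, true_and]
      rw [if_pos hsbj]
      have hc : ((sbj : Int) + 1) = ((sbj + 1 : Nat) : Int) := by push_cast; ring
      rw [hc]
      exact ih sbj (sbj + 1) (by omega) (by omega) (by omega)
        (fun k hk1 hk2 => ha k (by omega) hk2) (by omega)
    · have : ¬ ((i : Int) < (a.length : Int) ∨ (b.length : Int) < (b.length : Int)) := by
        push Not; exact ⟨by exact_mod_cast (by omega : a.length ≤ i), le_rfl⟩
      simp only [pvLoopA, PySem.List.len_eq, this, if_false]

-- Phase 2b when a ends in '>': the sweep hits a's final '>' with j = len b and returns False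
lemma pvAbsorbB_false (a b : List String) (hal : a.getD (a.length - 1) "" = ">") :
    ∀ (fuel : Nat) (i sbj : Nat),
      i + 1 ≤ a.length → i ≤ sbj → sbj ≤ i + 1 →
      (∀ k, i ≤ k → k + 1 < a.length → a.getD k "" ≠ ">") →
      2 * (a.length - i) + (i + 1 - sbj) + 1 ≤ fuel →
      pvLoopA a b fuel (i : Int) (b.length : Int) (-1) (sbj : Int) = false := by
  intro fuel
  induction fuel with
  | zero => intro i sbj _ _ _ _ hf; omega
  | succ f ih =>
    intro i sbj hi hs1 hs2 ha hf
    have hia : i < a.length := by omega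
    have hia' : (i : Int) < (a.length : Int) := by exact_mod_cast hia
    by_cases hlast : i = a.length - 1
    · have hai : a[i] = ">" := by
        rw [← List.getD_eq_getElem a "" hia, hlast]; exact hal
      simp only [pvLoopA, PySem.List.len_eq, lt_self_iff_false, if_false, or_false, hia',
        if_true, PySem.List.pyGet?_natCast, List.getElem?_eq_getElem hia,
        reduceCtorEq, Option.some.injEq, hai]
      rw [if_pos (Or.inr le_rfl)]
    · have hai : a.getD i "" ≠ ">" := ha i le_rfl (by omega)
      rw [List.getD_eq_getElem a "" hia] at hai
      have hsbj : (sbj : Int) ≤ (a.length : Int) := by exact_mod_cast (by omega : sbj ≤ a.length)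
      simp only [pvLoopA, PySem.List.len_eq, lt_self_iff_false, if_false, or_false, hia',
        if_true, PySem.List.pyGet?_natCast, List.getElem?_eq_getElem hia,
        reduceCtorEq, Option.some.injEq, hai, ne_eq, not_false_eq_true, and_false, false_and,
        or_self, not_true_eq_false, and_true, true_and]
      rw [if_pos hsbj]
      have hc : ((sbj : Int) + 1) = ((sbj + 1 : Nat) : Int) := by push_cast; ring
      rw [hc]
      exact ih sbj (sbj + 1) (by omega) (by omega) (by omega)
        (fun k hk1 hk2 => ha k (by omega) hk2) (by omega)

-- reverse bridges
lemma pvGetD_getLast {l : List String} (hne : l ≠ []) (h : l.getD (l.length - 1) "" = ">") :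
    l.getLast? = some ">" := by
  have hlen : l.length - 1 < l.length := by
    cases l with
    | nil => exact absurd rfl hne
    | cons x xs => simp
  rw [List.getLast?_eq_getElem?, List.getElem?_eq_getElem hlen]
  rw [List.getD_eq_getElem l "" hlen] at h
  simp [h]

lemma pvCompat_rev {a b : List String}
    (h : ∀ k, k + 1 < a.length → k + 1 < b.length →
      (a.getD k "" = b.getD k "" ∨ a.getD k "" = "*" ∨ b.getD k "" = "*")) :
    (((a.zip b).take (min a.length b.length - 1)).all
        fun p => p.1 == p.2 || p.1 == "*" || p.2 == "*") = true := by
  rw [List.all_eq_true]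
  intro x hx
  obtain ⟨k, hk, rfl⟩ := List.mem_iff_getElem.mp hx
  have hk' : k < min a.length b.length - 1 := by
    simpa [List.length_take, List.length_zip] using hk
  have hz : k < (a.zip b).length := by simp [List.length_zip]; omega
  have hget : ((a.zip b).take (min a.length b.length - 1))[k]'hk = (a.zip b)[k]'hz :=
    List.getElem_take
  have hzip : (a.zip b)[k]'hz = (a[k]'(by omega), b[k]'(by omega)) := List.getElem_zip
  rw [hget, hzip]
  have := h k (by omega) (by omega)
  rw [List.getD_eq_getElem a "" (by omega), List.getD_eq_getElem b "" (by omega)] at this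
  simp only [Bool.or_eq_true, beq_iff_eq]
  tauto

-- Phase 1: before any '>' is met the two cursors of A move in lockstep with B's single index
lemma pvPhase1_eq (a b : List String)
    (ha : ∀ k, k + 1 < a.length → a.getD k "" ≠ ">")
    (hb : ∀ k, k + 1 < b.length → b.getD k "" ≠ ">")
    (hnd : ¬ pvDlist a b) :
    ∀ (fuel : Nat) (fl i : Nat),
      i ≤ a.length → i ≤ b.length →
      (∀ k, k < i → (a.getD k "" = b.getD k "" ∨ a.getD k "" = "*" ∨ b.getD k "" = "*")) →
      min a.length b.length ≤ fl + i →
      2 * (a.length + b.length) + (min a.length b.length - i) + 4 ≤ fuel →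
      pvLoopA a b fuel (i : Int) (i : Int) (-1) (-1) = pvLoopB a b fl i := by
  intro fuel
  induction fuel with
  | zero => intro fl i _ _ _ _ hf; omega
  | succ f ih =>
    intro fl i hia hib hcomp hfl hf
    by_cases h1 : i < a.length
    · by_cases h2 : i < b.length
      · -- both tokens exist
        have h1' : (i : Int) < (a.length : Int) := by exact_mod_cast h1
        have h2' : (i : Int) < (b.length : Int) := by exact_mod_cast h2
        have hmin : i < min a.length b.length := by omega
        obtain ⟨fl', rfl⟩ : ∃ fl', fl = fl' + 1 := ⟨fl - 1, by omega⟩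
        by_cases hga : a[i] = ">"
        · -- a's final '>' absorbs: both sides True
          have hilast : i = a.length - 1 := by
            by_contra hne
            have := ha i (by omega)
            rw [List.getD_eq_getElem a "" h1] at this
            exact this hga
          have hb' : ∀ k, i + 1 ≤ k → k < b.length → b.getD k "" ≠ ">" := by
            intro k hk1 hk2 hcon
            by_cases hk3 : k + 1 < b.length
            · exact hb k hk3 hcon
            · have hk4 : k = b.length - 1 := by omega
              apply hnd
              refine ⟨pvGetD_getLast (by intro h0; subst h0; simp at h1) ?_,
                pvGetD_getLast (by intro h0; subst h0; simp at h2) ?_, by omega, ?_⟩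
              · rw [← hilast, List.getD_eq_getElem a "" h1]; exact hga
              · rw [← hk4]; exact hcon
              · exact pvCompat_rev (fun k' hk'1 hk'2 => hcomp k' (by omega))
          have hA : pvLoopA a b (f + 1) (i : Int) (i : Int) (-1) (-1) = true := by
            simp only [pvLoopA, PySem.List.len_eq, h1', true_or, if_true,
              PySem.List.pyGet?_natCast, List.getElem?_eq_getElem h1, Option.some.injEq, hga]
            rw [if_neg (by
              push Not
              constructor
              · rw [hilast]; omega
              · exact h2')]
            have hc1 : ((i : Int) + 1) = ((a.length : Nat) : Int) := by omega
            rw [hc1]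
            exact pvAbsorbA_true a b f a.length a.length (-1) (by omega) le_rfl (by omega)
              (fun k hk1 hk2 => hb' k (by omega) hk2) (by omega)
          have hB : pvLoopB a b (fl' + 1) i = true := by
            simp only [pvLoopB, hmin, if_true]
            rw [List.getD_eq_getElem a "" h1]
            rw [if_pos hga]
            simp [hilast]
          rw [hA, hB]
        · by_cases hgb : b[i] = ">"
          · -- b's final '>' absorbs: both sides True
            have hilast : i = b.length - 1 := by
              by_contra hne
              have := hb i (by omega)
              rw [List.getD_eq_getElem b "" h2] at this
              exact this hgb
            have ha' : ∀ k, i + 1 ≤ k → k < a.length → a.getD k "" ≠ ">" := by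
              intro k hk1 hk2 hcon
              by_cases hk3 : k + 1 < a.length
              · exact ha k hk3 hcon
              · have hk4 : k = a.length - 1 := by omega
                apply hnd
                refine ⟨pvGetD_getLast (by intro h0; subst h0; simp at h1) ?_,
                  pvGetD_getLast (by intro h0; subst h0; simp at h2) ?_, by omega, ?_⟩
                · rw [← hk4]; exact hcon
                · rw [← hilast, List.getD_eq_getElem b "" h2]; exact hgb
                · exact pvCompat_rev (fun k' hk'1 hk'2 => hcomp k' (by omega))
            have hA : pvLoopA a b (f + 1) (i : Int) (i : Int) (-1) (-1) = true := by
              simp only [pvLoopA, PySem.List.len_eq, h1', h2', true_or, if_true,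
                PySem.List.pyGet?_natCast, List.getElem?_eq_getElem h1,
                List.getElem?_eq_getElem h2, Option.some.injEq, hga, if_false, hgb]
              rw [if_neg (by
                push Not
                constructor
                · rw [hilast]; omega
                · exact h1')]
              have hc1 : ((i : Int) + 1) = ((b.length : Nat) : Int) := by omega
              rw [hc1]
              exact pvAbsorbB_true a b f b.length b.length (by omega) le_rfl (by omega)
                (fun k hk1 hk2 => ha' k (by omega) hk2) (by omega)
            have hB : pvLoopB a b (fl' + 1) i = true := by
              simp only [pvLoopB, hmin, if_true]
              rw [List.getD_eq_getElem a "" h1, List.getD_eq_getElem b "" h2]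
              rw [if_neg hga, if_pos hgb]
              simp [hilast]
            rw [hA, hB]
          · by_cases hcpt : (a[i] = b[i] ∨ a[i] = "*" ∨ b[i] = "*")
            · -- literal / '*' match: both advance
              have hA : pvLoopA a b (f + 1) (i : Int) (i : Int) (-1) (-1) =
                  pvLoopA a b f ((i : Int) + 1) ((i : Int) + 1) (-1) (-1) := by
                simp only [pvLoopA, PySem.List.len_eq, h1', h2', true_or, if_true,
                  PySem.List.pyGet?_natCast, List.getElem?_eq_getElem h1,
                  List.getElem?_eq_getElem h2, Option.some.injEq, hga, if_false, hgb]
                rcases hcpt with h | h | h <;> simp [h]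
              have hB : pvLoopB a b (fl' + 1) i = pvLoopB a b fl' (i + 1) := by
                simp only [pvLoopB, hmin, if_true]
                rw [List.getD_eq_getElem a "" h1, List.getD_eq_getElem b "" h2]
                rw [if_neg hga, if_neg hgb]
                rcases hcpt with h | h | h <;> simp [h]
              rw [hA, hB]
              have hc1 : ((i : Int) + 1) = ((i + 1 : Nat) : Int) := by push_cast; ring
              rw [hc1]
              exact ih fl' (i + 1) (by omega) (by omega)
                (by
                  intro k hk
                  by_cases hki : k < i
                  · exact hcomp k hki
                  · have : k = i := by omega
                    subst this
                    rw [List.getD_eq_getElem a "" h1, List.getD_eq_getElem b "" h2]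
                    exact hcpt)
                (by omega) (by omega)
            · -- dead end: both False
              push Not at hcpt
              have hA : pvLoopA a b (f + 1) (i : Int) (i : Int) (-1) (-1) = false := by
                simp only [pvLoopA, PySem.List.len_eq, h1', h2', true_or, if_true,
                  PySem.List.pyGet?_natCast, List.getElem?_eq_getElem h1,
                  List.getElem?_eq_getElem h2, Option.some.injEq, hga, if_false, hgb]
                simp [hcpt.1, hcpt.2.1, hcpt.2.2]
              have hB : pvLoopB a b (fl' + 1) i = false := by
                simp only [pvLoopB, hmin, if_true]
                rw [List.getD_eq_getElem a "" h1, List.getD_eq_getElem b "" h2]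
                rw [if_neg hga, if_neg hgb]
                simp [hcpt.1, hcpt.2.1, hcpt.2.2]
              rw [hA, hB]
      · -- i = b.length < a.length : b exhausted, a not → both False
        have h1' : (i : Int) < (a.length : Int) := by exact_mod_cast h1
        have hnlt : ¬ (i : Int) < (b.length : Int) := by exact_mod_cast (by omega : ¬ i < b.length)
        have hble : (b.length : Int) ≤ (i : Int) := by omega
        have hminle : ¬ i < min a.length b.length := by omega
        have hA : pvLoopA a b (f + 1) (i : Int) (i : Int) (-1) (-1) = false := by
          simp only [pvLoopA, PySem.List.len_eq, h1', true_or, if_true,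
            PySem.List.pyGet?_natCast, List.getElem?_eq_getElem h1, hnlt, if_false]
          by_cases hga : a[i] = ">"
          · simp [hga, hble]
          · simp [hga]
        have hB : pvLoopB a b fl i = false := by
          cases fl with
          | zero => simp only [pvLoopB]; simp; omega
          | succ fl' =>
            simp only [pvLoopB, hminle, if_false]
            simp; omega
        rw [hA, hB]
    · by_cases h2 : i < b.length
      · -- i = a.length < b.length : a exhausted, b not → both False
        have h2' : (i : Int) < (b.length : Int) := by exact_mod_cast h2
        have hnlt : ¬ (i : Int) < (a.length : Int) := by exact_mod_cast (by omega : ¬ i < a.length)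
        have hale : (a.length : Int) ≤ (i : Int) := by omega
        have hminle : ¬ i < min a.length b.length := by omega
        have hA : pvLoopA a b (f + 1) (i : Int) (i : Int) (-1) (-1) = false := by
          simp only [pvLoopA, PySem.List.len_eq, h2', or_true, if_true,
            PySem.List.pyGet?_natCast, List.getElem?_eq_getElem h2, hnlt, if_false]
          by_cases hgb : b[i] = ">"
          · simp [hgb, hale]
          · simp [hgb]
        have hB : pvLoopB a b fl i = false := by
          cases fl with
          | zero => simp only [pvLoopB]; simp; omega
          | succ fl' =>
            simp only [pvLoopB, hminle, if_false]
            simp; omega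
        rw [hA, hB]
      · -- both exhausted: True = (len a = len b)
        have hminle : ¬ i < min a.length b.length := by omega
        have hA : pvLoopA a b (f + 1) (i : Int) (i : Int) (-1) (-1) = true := by
          have hc : ¬ ((i : Int) < (a.length : Int) ∨ (i : Int) < (b.length : Int)) := by
            push Not
            exact ⟨by exact_mod_cast (by omega : a.length ≤ i),
              by exact_mod_cast (by omega : b.length ≤ i)⟩
          simp only [pvLoopA, PySem.List.len_eq, hc, if_false]
        have hB : pvLoopB a b fl i = true := by
          cases fl with
          | zero => simp only [pvLoopB]; simp; omega
          | succ fl' =>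
            simp only [pvLoopB, hminle, if_false]
            simp; omega
        rw [hA, hB]

-- Inside D_: A's walk reaches the shorter pattern's final '>' and the sweep ends False
lemma pvPhaseD_A (a b : List String)
    (ha : ∀ k, k + 1 < a.length → a.getD k "" ≠ ">")
    (hb : ∀ k, k + 1 < b.length → b.getD k "" ≠ ">")
    (hal : a.getD (a.length - 1) "" = ">") (hbl : b.getD (b.length - 1) "" = ">")
    (hlen : a.length ≠ b.length)
    (hcompat : ∀ k, k + 1 < a.length → k + 1 < b.length →
      (a.getD k "" = b.getD k "" ∨ a.getD k "" = "*" ∨ b.getD k "" = "*")) :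
    ∀ (fuel : Nat) (i : Nat), i + 1 ≤ min a.length b.length →
      2 * (a.length + b.length) + (min a.length b.length - i) + 4 ≤ fuel →
      pvLoopA a b fuel (i : Int) (i : Int) (-1) (-1) = false := by
  intro fuel
  induction fuel with
  | zero => intro i _ hf; omega
  | succ f ih =>
    intro i him hf
    have h1 : i < a.length := by omega
    have h2 : i < b.length := by omega
    have h1' : (i : Int) < (a.length : Int) := by exact_mod_cast h1
    have h2' : (i : Int) < (b.length : Int) := by exact_mod_cast h2
    by_cases hlast : i + 1 = min a.length b.length
    · rcases Nat.lt_or_ge a.length b.length with hord | hord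
      · -- a is shorter: its final '>' is hit first
        have hia : i = a.length - 1 := by omega
        have hga : a[i] = ">" := by
          rw [← List.getD_eq_getElem a "" h1, hia]; exact hal
        simp only [pvLoopA, PySem.List.len_eq, h1', true_or, if_true,
          PySem.List.pyGet?_natCast, List.getElem?_eq_getElem h1, Option.some.injEq, hga]
        rw [if_neg (by
          push Not
          constructor
          · rw [hia]; omega
          · exact h2')]
        have hc1 : ((i : Int) + 1) = ((a.length : Nat) : Int) := by omega
        rw [hc1]
        exact pvAbsorbA_false a b hbl f a.length a.length (-1) (by omega) le_rfl (by omega)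
          (fun k hk1 hk2 => hb k hk2) (by omega)
      · -- b is shorter
        have hord' : b.length < a.length := by omega
        have hib : i = b.length - 1 := by omega
        have hgb : b[i] = ">" := by
          rw [← List.getD_eq_getElem b "" h2, hib]; exact hbl
        have hga : ¬ a[i] = ">" := by
          have := ha i (by omega)
          rw [List.getD_eq_getElem a "" h1] at this
          exact this
        simp only [pvLoopA, PySem.List.len_eq, h1', h2', true_or, if_true,
          PySem.List.pyGet?_natCast, List.getElem?_eq_getElem h1,
          List.getElem?_eq_getElem h2, Option.some.injEq, hga, if_false, hgb]
        rw [if_neg (by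
          push Not
          constructor
          · rw [hib]; omega
          · exact h1')]
        have hc1 : ((i : Int) + 1) = ((b.length : Nat) : Int) := by omega
        rw [hc1]
        exact pvAbsorbB_false a b hal f b.length b.length (by omega) le_rfl (by omega)
          (fun k hk1 hk2 => ha k hk2) (by omega)
    · -- still in the compatible prefix: advance in lockstep
      have hga : ¬ a[i] = ">" := by
        have := ha i (by omega)
        rw [List.getD_eq_getElem a "" h1] at this
        exact this
      have hgb : ¬ b[i] = ">" := by
        have := hb i (by omega)
        rw [List.getD_eq_getElem b "" h2] at this
        exact this
      have hcpt : (a[i] = b[i] ∨ a[i] = "*" ∨ b[i] = "*") := by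
        have := hcompat i (by omega) (by omega)
        rw [List.getD_eq_getElem a "" h1, List.getD_eq_getElem b "" h2] at this
        exact this
      have hA : pvLoopA a b (f + 1) (i : Int) (i : Int) (-1) (-1) =
          pvLoopA a b f ((i : Int) + 1) ((i : Int) + 1) (-1) (-1) := by
        simp only [pvLoopA, PySem.List.len_eq, h1', h2', true_or, if_true,
          PySem.List.pyGet?_natCast, List.getElem?_eq_getElem h1,
          List.getElem?_eq_getElem h2, Option.some.injEq, hga, if_false, hgb]
        rcases hcpt with h | h | h <;> simp [h]
      rw [hA]
      have hc1 : ((i : Int) + 1) = ((i + 1 : Nat) : Int) := by push_cast; ring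
      rw [hc1]
      exact ih (i + 1) (by omega) (by omega)

-- Inside D_: B answers True at the shorter pattern's final '>'
lemma pvPhaseD_B (a b : List String)
    (ha : ∀ k, k + 1 < a.length → a.getD k "" ≠ ">")
    (hb : ∀ k, k + 1 < b.length → b.getD k "" ≠ ">")
    (hal : a.getD (a.length - 1) "" = ">") (hbl : b.getD (b.length - 1) "" = ">")
    (hlen : a.length ≠ b.length)
    (hcompat : ∀ k, k + 1 < a.length → k + 1 < b.length →
      (a.getD k "" = b.getD k "" ∨ a.getD k "" = "*" ∨ b.getD k "" = "*")) :
    ∀ (fl : Nat) (i : Nat), i + 1 ≤ min a.length b.length →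
      min a.length b.length ≤ fl + i →
      pvLoopB a b fl i = true := by
  intro fl
  induction fl with
  | zero => intro i him hfl; omega
  | succ fl' ih =>
    intro i him hfl
    have hmin : i < min a.length b.length := by omega
    have h1 : i < a.length := by omega
    have h2 : i < b.length := by omega
    simp only [pvLoopB, hmin, if_true]
    by_cases hlast : i + 1 = min a.length b.length
    · rcases Nat.lt_or_ge a.length b.length with hord | hord
      · have hia : i = a.length - 1 := by omega
        have hga : a.getD i "" = ">" := by rw [hia]; exact hal
        rw [if_pos hga]
        simp [hia]
      · have hord' : b.length < a.length := by omega
        have hib : i = b.length - 1 := by omega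
        have hgb : b.getD i "" = ">" := by rw [hib]; exact hbl
        have hga : a.getD i "" ≠ ">" := ha i (by omega)
        rw [if_neg hga, if_pos hgb]
        simp [hib]
    · have hga : a.getD i "" ≠ ">" := ha i (by omega)
      have hgb : b.getD i "" ≠ ">" := hb i (by omega)
      rw [if_neg hga, if_neg hgb]
      rw [if_neg (by
        have := hcompat i (by omega) (by omega)
        tauto)]
      exact ih (i + 1) (by omega) (by omega)

-- ===== VERDICT =====
theorem topic_pattern_matcher_spec : Claim_unchanged_topic_pattern_matcher := by
  unfold Claim_unchanged_topic_pattern_matcher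
  intro pa pb _ hpre hnd
  obtain ⟨hpa, hpb⟩ := hpre
  show topic_pattern_matcher pa pb = topic_pattern_matcher_alt pa pb
  unfold topic_pattern_matcher topic_pattern_matcher_alt
  have hnd' : ¬ pvDlist (pvTokens pa) (pvTokens pb) := hnd
  have := pvPhase1_eq (pvTokens pa) (pvTokens pb) (pvNoInner_idx hpa) (pvNoInner_idx hpb) hnd'
    (((pvTokens pa).length + (pvTokens pb).length + 4) * 4)
    (min (pvTokens pa).length (pvTokens pb).length) 0
    (by omega) (by omega) (by intro k hk; omega) (by omega) (by omega)
  simpa using this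

theorem topic_pattern_matcher_changed : Claim_changed_topic_pattern_matcher := by
  unfold Claim_changed_topic_pattern_matcher; decide

theorem topic_pattern_matcher_tight : Claim_exact_topic_pattern_matcher := by
  unfold Claim_exact_topic_pattern_matcher
  intro pa pb _ hpre hd
  obtain ⟨hpa, hpb⟩ := hpre
  obtain ⟨hga', hgb', hlen, hcall⟩ := hd
  obtain ⟨hne_a, hal⟩ := pvGetLast_getD hga'
  obtain ⟨hne_b, hbl⟩ := pvGetLast_getD hgb'
  have hposa : 0 < (pvTokens pa).length := List.length_pos_iff.mpr hne_a
  have hposb : 0 < (pvTokens pb).length := List.length_pos_iff.mpr hne_b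
  have hA : topic_pattern_matcher pa pb = false := by
    unfold topic_pattern_matcher
    have := pvPhaseD_A (pvTokens pa) (pvTokens pb) (pvNoInner_idx hpa) (pvNoInner_idx hpb)
      hal hbl hlen (pvCompat_idx hcall)
      (((pvTokens pa).length + (pvTokens pb).length + 4) * 4) 0 (by omega) (by omega)
    simpa using this
  have hB : topic_pattern_matcher_alt pa pb = true := by
    unfold topic_pattern_matcher_alt
    have := pvPhaseD_B (pvTokens pa) (pvTokens pb) (pvNoInner_idx hpa) (pvNoInner_idx hpb)
      hal hbl hlen (pvCompat_idx hcall)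
      (min (pvTokens pa).length (pvTokens pb).length) 0 (by omega) (by omega)
    simpa using this
  rw [hA, hB]
  decide
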